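-- pv_equiv track=rewrite | github.com/limdongjin/ProblemSolving | Boj/1992.py | solve
-- ===== SOURCE A (Python) =====
-- def solve(board, start, n):
--     y, x = start
--     if n == 1:
--         if board[y][x] == 0:
--             return '0'
--         elif board[y][x] == 1:
--             return '1'
--     ret = ''
--     n_divide2 = n // 2
--     for dy in range(2):
--         for dx in range(2):
--             d = solve(board, (y + n_divide2*dy, x + n_divide2*dx), n_divide2)
--             ret += d
--     if ret == '1111':
--         return '1'
--     elif ret == '0000':
--         return '0'
--
--     return '('+ret+')'
-- ===== SOURCE B (Python) =====
-- def solve(board, start, n):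
--     y, x = start
--     if n == 1:
--         c = board[y][x]
--         if c == 0:
--             return '0'
--         if c == 1:
--             return '1'
--     else:
--         vals = {board[y + i][x + j] for i in range(n) for j in range(n)}
--         if vals == {0}:
--             return '0'
--         if vals == {1}:
--             return '1'
--     m = n // 2
--     return ('(' + solve(board, (y, x), m) + solve(board, (y, x + m), m)
--             + solve(board, (y + m, x), m) + solve(board, (y + m, x + m), m) + ')')
-- ===== Notes on version B (the rewrite author's own statement) =====
-- stated objective: alternative
-- what changed: B decides each region's digit by a direct all-0/all-1 scan of its cells before recursing, instead of A's recurse-first scheme that concatenates the four child strings and compares them with '0000'/'1111'.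
-- outside the precondition, e.g. on solve([[0, 0, 1], [0, 0, 1], [1, 1, 1]], (0, 0), 3): A returns '0', B returns '(0000)'
import Mathlib
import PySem

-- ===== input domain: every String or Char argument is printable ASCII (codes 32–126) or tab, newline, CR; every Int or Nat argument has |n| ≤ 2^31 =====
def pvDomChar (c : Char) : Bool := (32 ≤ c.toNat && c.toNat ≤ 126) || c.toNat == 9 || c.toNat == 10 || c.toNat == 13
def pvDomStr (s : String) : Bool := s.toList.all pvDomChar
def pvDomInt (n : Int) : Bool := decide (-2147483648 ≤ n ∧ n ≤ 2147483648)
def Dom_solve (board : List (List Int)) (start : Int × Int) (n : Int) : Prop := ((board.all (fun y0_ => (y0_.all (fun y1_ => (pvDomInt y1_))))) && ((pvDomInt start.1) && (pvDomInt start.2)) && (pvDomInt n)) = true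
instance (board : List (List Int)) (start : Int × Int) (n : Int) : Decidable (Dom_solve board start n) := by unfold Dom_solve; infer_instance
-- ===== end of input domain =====

-- B replaces A's recurse-first-then-compare-with-'0000'/'1111' scheme by a direct homogeneity
-- scan of the region (all-0 / all-1) that emits the digit before recursing; same recursion on
-- quadrants otherwise ("alternative", no speed claim).

-- board[y][x] as both Pythons read it (negative index wraps); the default 0 is only taken
-- where Python would raise IndexError, which Pre_solve excludes.
def cellD (board : List (List Int)) (y x : Int) : Int :=
  (((PySem.List.pyGet? board y).bind (fun row => PySem.List.pyGet? row x)).getD 0)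

-- termination helper for both ports (cited in decreasing_by)
theorem floordiv_two_toNat_lt (n : Int) (h : 2 ≤ n) :
    (PySem.Int.floordiv n 2).toNat < n.toNat := by
  rw [PySem.Int.floordiv_eq_ediv_of_pos (by omega)]; omega

-- ===== PORT A =====
-- the strings of A, built on List Char (PySem convention); 'solve' wraps it into String.
-- On inputs where the Python recurses forever (n ≤ 0, or n = 1 with a non-0/1 cell) the port
-- returns [] — those inputs are outside Pre_solve.
def solveChars (board : List (List Int)) (y x : Int) (n : Int) : List Char :=
  if n = 1 ∧ cellD board y x = 0 then ['0']
  else if n = 1 ∧ cellD board y x = 1 then ['1']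
  else if _h2 : n ≤ 1 then []
  else
    if (solveChars board y x (PySem.Int.floordiv n 2) ++
        solveChars board y (x + PySem.Int.floordiv n 2) (PySem.Int.floordiv n 2) ++
        solveChars board (y + PySem.Int.floordiv n 2) x (PySem.Int.floordiv n 2) ++
        solveChars board (y + PySem.Int.floordiv n 2) (x + PySem.Int.floordiv n 2) (PySem.Int.floordiv n 2)) = ['1','1','1','1'] then ['1']
    else if (solveChars board y x (PySem.Int.floordiv n 2) ++
        solveChars board y (x + PySem.Int.floordiv n 2) (PySem.Int.floordiv n 2) ++
        solveChars board (y + PySem.Int.floordiv n 2) x (PySem.Int.floordiv n 2) ++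
        solveChars board (y + PySem.Int.floordiv n 2) (x + PySem.Int.floordiv n 2) (PySem.Int.floordiv n 2)) = ['0','0','0','0'] then ['0']
    else '(' :: ((solveChars board y x (PySem.Int.floordiv n 2) ++
        solveChars board y (x + PySem.Int.floordiv n 2) (PySem.Int.floordiv n 2) ++
        solveChars board (y + PySem.Int.floordiv n 2) x (PySem.Int.floordiv n 2) ++
        solveChars board (y + PySem.Int.floordiv n 2) (x + PySem.Int.floordiv n 2) (PySem.Int.floordiv n 2)) ++ [')'])
termination_by n.toNat
decreasing_by all_goals exact floordiv_two_toNat_lt n (by omega)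

def solve (board : List (List Int)) (start : Int × Int) (n : Int) : String :=
  String.ofList (solveChars board start.1 start.2 n)

-- ===== PORT B =====
-- {board[y+i][x+j] for i in range(n) for j in range(n)} : the generated values, first occurrences
def cells (board : List (List Int)) (y x : Int) (m : Nat) : List Int :=
  (List.range m).flatMap (fun (i : Nat) =>
    (List.range m).map (fun (j : Nat) => cellD board (y + (i : Int)) (x + (j : Int))))

def altChars (board : List (List Int)) (y x : Int) (n : Int) : List Char :=
  if h1 : n = 1 then
    if cellD board y x = 0 then ['0']
    else if cellD board y x = 1 then ['1']
    else '(' :: ((altChars board y x (PySem.Int.floordiv n 2) ++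
        altChars board y (x + PySem.Int.floordiv n 2) (PySem.Int.floordiv n 2) ++
        altChars board (y + PySem.Int.floordiv n 2) x (PySem.Int.floordiv n 2) ++
        altChars board (y + PySem.Int.floordiv n 2) (x + PySem.Int.floordiv n 2) (PySem.Int.floordiv n 2)) ++ [')'])
  else if _h2 : n ≤ 1 then []  -- Python B recurses forever here (n ≤ 0); guard for totality only, outside Pre_solve
  else if PySem.Set.equal (PySem.Set.ofList (cells board y x n.toNat)) (PySem.Set.ofList [0]) = true then ['0']
  else if PySem.Set.equal (PySem.Set.ofList (cells board y x n.toNat)) (PySem.Set.ofList [1]) = true then ['1']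
  else '(' :: ((altChars board y x (PySem.Int.floordiv n 2) ++
        altChars board y (x + PySem.Int.floordiv n 2) (PySem.Int.floordiv n 2) ++
        altChars board (y + PySem.Int.floordiv n 2) x (PySem.Int.floordiv n 2) ++
        altChars board (y + PySem.Int.floordiv n 2) (x + PySem.Int.floordiv n 2) (PySem.Int.floordiv n 2)) ++ [')'])
termination_by n.toNat
decreasing_by
  all_goals first
  | (subst h1; decide)
  | (exact floordiv_two_toNat_lt n (by omega))

def solve_alt (board : List (List Int)) (start : Int × Int) (n : Int) : String :=
  String.ofList (altChars board start.1 start.2 n)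

-- ===== PRECONDITION & SPEC =====
-- Pre_solve excludes: inputs where A raises (out-of-range cell → IndexError; n ≤ 0, or any
-- visited non-0/1 cell → RecursionError), and non-power-of-two n, on which A returns but its
-- value is an artefact of visiting only an accidental 2-power sub-pattern of the region.
def Pre_solve (board : List (List Int)) (start : Int × Int) (n : Int) : Prop :=
  (∃ k ∈ List.range 32, n = (2 : Int) ^ k) ∧
  -- n ≤ 2*len(board) holds whenever A returns: row indices y, …, y+n-1 must all be valid
  -- (possibly negative) Python indices, i.e. lie in [-len, len); stated first so that the
  -- cell scan below is only evaluated on boards large enough to matter.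
  n.toNat ≤ 2 * board.length ∧
  ∀ i ∈ List.range n.toNat, ∀ j ∈ List.range n.toNat,
    ((PySem.List.pyGet? board (start.1 + i)).bind
      (fun row => PySem.List.pyGet? row (start.2 + j))) = some 0 ∨
    ((PySem.List.pyGet? board (start.1 + i)).bind
      (fun row => PySem.List.pyGet? row (start.2 + j))) = some 1
instance (board : List (List Int)) (start : Int × Int) (n : Int) : Decidable (Pre_solve board start n) := by unfold Pre_solve; infer_instance

def pvWitness_solve : List (List Int) × (Int × Int) × Int := ([[0, 1], [1, 0]], (0, 0), 2)

def Spec_solve (board : List (List Int)) (start : Int × Int) (n : Int) (out : String) : Prop := out = solve_alt board start n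
instance (board : List (List Int)) (start : Int × Int) (n : Int) (out : String) : Decidable (Spec_solve board start n out) := by unfold Spec_solve; infer_instance

-- ===== CLAIM (what is proved, stated in full; the proofs are below) =====
def Claim_equal_solve : Prop := ∀ (board : List (List Int)) (start : Int × Int) (n : Int), Dom_solve board start n → Pre_solve board start n → Spec_solve board start n (solve board start n)

-- ===== LEMMAS AND PROOFS =====

-- proof-side helper: all cells of the m×m square at (y,x) equal v
def uniform (board : List (List Int)) (y x : Int) (m : Nat) (v : Int) : Bool :=
  (List.range m).all (fun i => (List.range m).all (fun j => cellD board (y + i) (x + j) == v))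

-- all cells of the m×m square at (y,x) are 0 or 1
def Bin (board : List (List Int)) (y x : Int) (m : Nat) : Prop :=
  ∀ i < m, ∀ j < m, cellD board (y + i) (x + j) = 0 ∨ cellD board (y + i) (x + j) = 1

-- shape of every string the compressor emits
def Shape (cs : List Char) : Prop :=
  cs = ['0'] ∨ cs = ['1'] ∨ ∃ t, cs = '(' :: (t ++ [')'])

theorem uniform_iff (board : List (List Int)) (y x : Int) (m : Nat) (v : Int) :
    uniform board y x m v = true ↔ ∀ i < m, ∀ j < m, cellD board (y + i) (x + j) = v := by
  simp [uniform, List.all_eq_true, List.mem_range]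

theorem cells_mem (board : List (List Int)) (y x : Int) (m : Nat) (a : Int) :
    a ∈ cells board y x m ↔
      ∃ i : Nat, i < m ∧ ∃ j : Nat, j < m ∧ a = cellD board (y + i) (x + j) := by
  constructor
  · intro ha
    obtain ⟨i, hi, hmem⟩ := List.mem_flatMap.1 ha
    obtain ⟨j, hj, he⟩ := List.mem_map.1 hmem
    exact ⟨i, List.mem_range.1 hi, j, List.mem_range.1 hj, he.symm⟩
  · rintro ⟨i, hi, j, hj, rfl⟩
    exact List.mem_flatMap.2 ⟨i, List.mem_range.2 hi, List.mem_map.2 ⟨j, List.mem_range.2 hj, rfl⟩⟩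

theorem setEq_iff_uniform (board : List (List Int)) (y x : Int) (m : Nat) (v : Int)
    (hm : 0 < m) :
    PySem.Set.equal (PySem.Set.ofList (cells board y x m)) (PySem.Set.ofList [v]) = true ↔
      uniform board y x m v = true := by
  rw [PySem.Set.equal_iff, uniform_iff]
  simp only [PySem.Set.mem_ofList, List.mem_singleton]
  constructor
  · intro h i hi j hj
    exact (h _).1 ((cells_mem board y x m _).2 ⟨i, hi, j, hj, rfl⟩)
  · intro h a
    constructor
    · intro ha
      obtain ⟨i, hi, j, hj, rfl⟩ := (cells_mem board y x m a).1 ha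
      exact h i hi j hj
    · rintro rfl
      exact (cells_mem board y x m _).2 ⟨0, hm, 0, hm, (h 0 hm 0 hm).symm⟩

theorem uniform_split (board : List (List Int)) (y x : Int) (m : Nat) (v : Int) :
    uniform board y x (m + m) v = true ↔
      (uniform board y x m v = true ∧ uniform board y (x + (m : Int)) m v = true ∧
       uniform board (y + (m : Int)) x m v = true ∧
       uniform board (y + (m : Int)) (x + (m : Int)) m v = true) := by
  simp only [uniform_iff]
  constructor
  · intro h
    refine ⟨?_, ?_, ?_, ?_⟩ <;> intro i hi j hj
    · exact h i (by omega) j (by omega)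
    · have := h i (by omega) (m + j) (by omega)
      rw [show (x + (m : Int)) + (j : Int) = x + ((m + j : Nat) : Int) by push_cast; ring]
      exact this
    · have := h (m + i) (by omega) j (by omega)
      rw [show (y + (m : Int)) + (i : Int) = y + ((m + i : Nat) : Int) by push_cast; ring]
      exact this
    · have := h (m + i) (by omega) (m + j) (by omega)
      rw [show (y + (m : Int)) + (i : Int) = y + ((m + i : Nat) : Int) by push_cast; ring,
          show (x + (m : Int)) + (j : Int) = x + ((m + j : Nat) : Int) by push_cast; ring]
      exact this
  · rintro ⟨h1, h2, h3, h4⟩ i hi j hj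
    rcases Nat.lt_or_ge i m with hil | hig
    · rcases Nat.lt_or_ge j m with hjl | hjg
      · exact h1 i hil j hjl
      · have := h2 i hil (j - m) (by omega)
        rw [show x + (j : Int) = (x + (m : Int)) + ((j - m : Nat) : Int) by
              have : (j : Int) = (m : Int) + ((j - m : Nat) : Int) := by push_cast [Nat.cast_sub hjg]; ring
              rw [this]; ring]
        exact this
    · rcases Nat.lt_or_ge j m with hjl | hjg
      · have := h3 (i - m) (by omega) j hjl
        rw [show y + (i : Int) = (y + (m : Int)) + ((i - m : Nat) : Int) by
              have : (i : Int) = (m : Int) + ((i - m : Nat) : Int) := by push_cast [Nat.cast_sub hig]; ring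
              rw [this]; ring]
        exact this
      · have := h4 (i - m) (by omega) (j - m) (by omega)
        rw [show y + (i : Int) = (y + (m : Int)) + ((i - m : Nat) : Int) by
              have : (i : Int) = (m : Int) + ((i - m : Nat) : Int) := by push_cast [Nat.cast_sub hig]; ring
              rw [this]; ring,
            show x + (j : Int) = (x + (m : Int)) + ((j - m : Nat) : Int) by
              have : (j : Int) = (m : Int) + ((j - m : Nat) : Int) := by push_cast [Nat.cast_sub hjg]; ring
              rw [this]; ring]
        exact this

theorem Bin_split (board : List (List Int)) (y x : Int) (m : Nat)
    (h : Bin board y x (m + m)) :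
    Bin board y x m ∧ Bin board y (x + (m : Int)) m ∧
    Bin board (y + (m : Int)) x m ∧ Bin board (y + (m : Int)) (x + (m : Int)) m := by
  refine ⟨?_, ?_, ?_, ?_⟩ <;> intro i hi j hj
  · exact h i (by omega) j (by omega)
  · have := h i (by omega) (m + j) (by omega)
    rw [show (x + (m : Int)) + (j : Int) = x + ((m + j : Nat) : Int) by push_cast; ring]
    exact this
  · have := h (m + i) (by omega) j (by omega)
    rw [show (y + (m : Int)) + (i : Int) = y + ((m + i : Nat) : Int) by push_cast; ring]
    exact this
  · have := h (m + i) (by omega) (m + j) (by omega)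
    rw [show (y + (m : Int)) + (i : Int) = y + ((m + i : Nat) : Int) by push_cast; ring,
        show (x + (m : Int)) + (j : Int) = x + ((m + j : Nat) : Int) by push_cast; ring]
    exact this

theorem head_one (a r s : List Char) (ha : Shape a) (h : a ++ r = '1' :: s) :
    a = ['1'] ∧ r = s := by
  rcases ha with rfl | rfl | ⟨t, rfl⟩
  · simp at h
  · simpa using h
  · simp at h

theorem head_zero (a r s : List Char) (ha : Shape a) (h : a ++ r = '0' :: s) :
    a = ['0'] ∧ r = s := by
  rcases ha with rfl | rfl | ⟨t, rfl⟩
  · simpa using h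
  · simp at h
  · simp at h

theorem quad_one (a b c d : List Char) (ha : Shape a) (hb : Shape b) (hc : Shape c)
    (hd : Shape d) :
    (a ++ b ++ c ++ d = ['1', '1', '1', '1']) ↔ (a = ['1'] ∧ b = ['1'] ∧ c = ['1'] ∧ d = ['1']) := by
  constructor
  · intro h
    rw [List.append_assoc, List.append_assoc] at h
    obtain ⟨ea, h1'⟩ := head_one a _ _ ha h
    obtain ⟨eb, h2'⟩ := head_one b _ _ hb h1'
    obtain ⟨ec, h3'⟩ := head_one c _ _ hc h2'
    exact ⟨ea, eb, ec, head_one d [] _ hd (by simpa using h3') |>.1⟩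
  · rintro ⟨rfl, rfl, rfl, rfl⟩; rfl

theorem quad_zero (a b c d : List Char) (ha : Shape a) (hb : Shape b) (hc : Shape c)
    (hd : Shape d) :
    (a ++ b ++ c ++ d = ['0', '0', '0', '0']) ↔ (a = ['0'] ∧ b = ['0'] ∧ c = ['0'] ∧ d = ['0']) := by
  constructor
  · intro h
    rw [List.append_assoc, List.append_assoc] at h
    obtain ⟨ea, h1'⟩ := head_zero a _ _ ha h
    obtain ⟨eb, h2'⟩ := head_zero b _ _ hb h1'
    obtain ⟨ec, h3'⟩ := head_zero c _ _ hc h2'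
    exact ⟨ea, eb, ec, head_zero d [] _ hd (by simpa using h3') |>.1⟩
  · rintro ⟨rfl, rfl, rfl, rfl⟩; rfl

theorem uniform_not_both (board : List (List Int)) (y x : Int) (m : Nat) (hm : 0 < m)
    (h0 : uniform board y x m 0 = true) (h1 : uniform board y x m 1 = true) : False := by
  rw [uniform_iff] at h0 h1
  have e0 := h0 0 hm 0 hm
  have e1 := h1 0 hm 0 hm
  omega

theorem uniform_one (board : List (List Int)) (y x : Int) (v : Int) :
    uniform board y x 1 v = true ↔ cellD board y x = v := by
  rw [uniform_iff]
  constructor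
  · intro h; simpa using h 0 (by norm_num) 0 (by norm_num)
  · intro h i hi j hj
    have hi0 : i = 0 := by omega
    have hj0 : j = 0 := by omega
    subst hi0; subst hj0; simpa using h

-- the joint induction: A = B, the shape invariant, and the two uniformity characterisations
theorem main_lemma (board : List (List Int)) :
    ∀ (k : Nat) (y x n : Int), n = (2 : Int) ^ k → Bin board y x (2 ^ k) →
      solveChars board y x n = altChars board y x n ∧
      Shape (altChars board y x n) ∧
      (altChars board y x n = ['0'] ↔ uniform board y x (2 ^ k) 0 = true) ∧
      (altChars board y x n = ['1'] ↔ uniform board y x (2 ^ k) 1 = true) := by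
  intro k
  induction k with
  | zero =>
    intro y x n hn hb
    have hn1 : n = 1 := by rw [hn]; norm_num
    subst hn1
    have hc := hb 0 (by norm_num) 0 (by norm_num)
    norm_num at hc
    rcases hc with hc | hc
    · rw [solveChars, altChars, if_pos ⟨rfl, hc⟩, dif_pos rfl, if_pos hc]
      refine ⟨rfl, Or.inl rfl, ?_, ?_⟩
      · simp [pow_zero, uniform_one, hc]
      · simp [pow_zero, uniform_one, hc]
    · rw [solveChars, altChars,
          if_neg (by rintro ⟨_, h0⟩; rw [hc] at h0; norm_num at h0),
          if_pos ⟨rfl, hc⟩, dif_pos rfl,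
          if_neg (by rw [hc]; norm_num), if_pos hc]
      refine ⟨rfl, Or.inr (Or.inl rfl), ?_, ?_⟩
      · simp [pow_zero, uniform_one, hc]
      · simp [pow_zero, uniform_one, hc]
  | succ k ih =>
    intro y x n hn hb
    have hpow : (1 : Int) ≤ 2 ^ k := one_le_pow₀ (by norm_num)
    have h2n : (2 : Int) ≤ n := by
      rw [hn, pow_succ]; linarith
    have hn1 : ¬ (n = 1) := by omega
    have hm : PySem.Int.floordiv n 2 = ((2 ^ k : Nat) : Int) := by
      rw [hn, pow_succ, PySem.Int.floordiv_eq_ediv_of_pos (by norm_num),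
          Int.mul_ediv_cancel _ (by norm_num)]
      push_cast; ring
    have htn : n.toNat = 2 ^ k + 2 ^ k := by
      rw [hn, show ((2 : Int) ^ (k + 1)) = (((2 ^ k + 2 ^ k : Nat)) : Int) by push_cast; ring,
          Int.toNat_natCast]
    have hbb : Bin board y x (2 ^ k + 2 ^ k) := by
      have e : (2 : Nat) ^ (k + 1) = 2 ^ k + 2 ^ k := by rw [pow_succ, Nat.mul_two]
      rw [← e]; exact hb
    obtain ⟨hb1, hb2, hb3, hb4⟩ := Bin_split board y x (2 ^ k) hbb
    have hcast : (((2 ^ k : Nat)) : Int) = (2 : Int) ^ k := by push_cast; ring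
    obtain ⟨e1, s1, u01, u11⟩ := ih y x ((2 ^ k : Nat) : Int) hcast hb1
    obtain ⟨e2, s2, u02, u12⟩ := ih y (x + ((2 ^ k : Nat) : Int)) ((2 ^ k : Nat) : Int) hcast hb2
    obtain ⟨e3, s3, u03, u13⟩ := ih (y + ((2 ^ k : Nat) : Int)) x ((2 ^ k : Nat) : Int) hcast hb3
    obtain ⟨e4, s4, u04, u14⟩ := ih (y + ((2 ^ k : Nat) : Int)) (x + ((2 ^ k : Nat) : Int)) ((2 ^ k : Nat) : Int) hcast hb4
    have hmpos : 0 < 2 ^ k + 2 ^ k := by positivity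
    rw [solveChars, altChars,
        if_neg (by rintro ⟨h, _⟩; exact hn1 h),
        if_neg (by rintro ⟨h, _⟩; exact hn1 h),
        dif_neg (by omega : ¬ n ≤ 1),
        dif_neg hn1, dif_neg (by omega : ¬ n ≤ 1), htn, hm,
        show (2 : Nat) ^ (k + 1) = 2 ^ k + 2 ^ k from by rw [pow_succ, Nat.mul_two],
        e1, e2, e3, e4]
    have hs0 := setEq_iff_uniform board y x (2 ^ k + 2 ^ k) 0 hmpos
    have hs1 := setEq_iff_uniform board y x (2 ^ k + 2 ^ k) 1 hmpos
    by_cases hu0 : uniform board y x (2 ^ k + 2 ^ k) 0 = true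
    · obtain ⟨q1, q2, q3, q4⟩ := (uniform_split board y x (2 ^ k) 0).1 hu0
      rw [if_pos (hs0.2 hu0), u01.2 q1, u02.2 q2, u03.2 q3, u04.2 q4]
      refine ⟨by decide, Or.inl rfl, ⟨fun _ => hu0, fun _ => rfl⟩, ?_⟩
      constructor
      · intro h; exact absurd h (by decide)
      · intro h; exact absurd (uniform_not_both board y x _ hmpos hu0 h) (fun f => f)
    · rw [if_neg (fun hh => hu0 (hs0.1 hh))]
      by_cases hu1 : uniform board y x (2 ^ k + 2 ^ k) 1 = true
      · obtain ⟨q1, q2, q3, q4⟩ := (uniform_split board y x (2 ^ k) 1).1 hu1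
        rw [if_pos (hs1.2 hu1), u11.2 q1, u12.2 q2, u13.2 q3, u14.2 q4]
        refine ⟨by decide, Or.inr (Or.inl rfl), ?_, ⟨fun _ => hu1, fun _ => rfl⟩⟩
        constructor
        · intro h; exact absurd h (by decide)
        · intro h; exact absurd h hu0
      · have hno1 : ¬ (altChars board y x ((2 ^ k : Nat) : Int) ++
            altChars board y (x + ((2 ^ k : Nat) : Int)) ((2 ^ k : Nat) : Int) ++
            altChars board (y + ((2 ^ k : Nat) : Int)) x ((2 ^ k : Nat) : Int) ++
            altChars board (y + ((2 ^ k : Nat) : Int)) (x + ((2 ^ k : Nat) : Int)) ((2 ^ k : Nat) : Int)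
            = ['1', '1', '1', '1']) := by
          intro h
          obtain ⟨a1, a2, a3, a4⟩ := (quad_one _ _ _ _ s1 s2 s3 s4).1 h
          exact hu1 ((uniform_split board y x (2 ^ k) 1).2
            ⟨u11.1 a1, u12.1 a2, u13.1 a3, u14.1 a4⟩)
        have hno0 : ¬ (altChars board y x ((2 ^ k : Nat) : Int) ++
            altChars board y (x + ((2 ^ k : Nat) : Int)) ((2 ^ k : Nat) : Int) ++
            altChars board (y + ((2 ^ k : Nat) : Int)) x ((2 ^ k : Nat) : Int) ++
            altChars board (y + ((2 ^ k : Nat) : Int)) (x + ((2 ^ k : Nat) : Int)) ((2 ^ k : Nat) : Int)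
            = ['0', '0', '0', '0']) := by
          intro h
          obtain ⟨a1, a2, a3, a4⟩ := (quad_zero _ _ _ _ s1 s2 s3 s4).1 h
          exact hu0 ((uniform_split board y x (2 ^ k) 0).2
            ⟨u01.1 a1, u02.1 a2, u03.1 a3, u04.1 a4⟩)
        rw [if_neg (fun hh => hu1 (hs1.1 hh)), if_neg hno1, if_neg hno0]
        refine ⟨rfl, Or.inr (Or.inr ⟨_, rfl⟩), ?_, ?_⟩
        · constructor
          · intro h; simp at h
          · intro h; exact absurd h hu0
        · constructor
          · intro h; simp at h
          · intro h; exact absurd h hu1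

-- ===== VERDICT (by name: the statement is the Claim_ definition above) =====
theorem solve_spec : Claim_equal_solve := by
  intro board start n _hDom hPre
  unfold Spec_solve
  obtain ⟨⟨k, _hk, hkn⟩, _, hcells⟩ := hPre
  have htn : n.toNat = 2 ^ k := by
    rw [hkn, show ((2 : Int) ^ k) = ((2 ^ k : Nat) : Int) by push_cast; ring, Int.toNat_natCast]
  have hbin : Bin board start.1 start.2 (2 ^ k) := by
    intro i hi j hj
    have := hcells i (List.mem_range.2 (by omega)) j (List.mem_range.2 (by omega))
    unfold cellD
    rcases this with h | h <;> rw [h] <;> simp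
  have := (main_lemma board k start.1 start.2 n hkn hbin).1
  unfold solve solve_alt
  rw [this]
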